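-- pv_equiv track=rewrite | github.com/jeqcho/single-winner-generative-social-choice | scripts/recompute_epsilons_fix_bug.py | construct_101_preferences
-- ===== SOURCE A (Python) =====
-- from typing import List, Dict, Optional, Tuple
--
-- def construct_101_preferences(
--     preferences: List[List[str]],
--     insertion_positions: List[int]
-- ) -> List[List[str]]:
--     """
--     Construct 101-alternative preference profile by inserting new statement.
--
--     Args:
--         preferences: Original 100x100 preference matrix [rank][voter]
--         insertion_positions: List of positions where "100" should be inserted for each voter
--
--     Returns:
--         New preference matrix with 101 alternatives [rank][voter]
--     """
--     n_ranks = len(preferences)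
--     n_voters = len(preferences[0]) if preferences else 0
--
--     # Convert to voter-centric format
--     voter_rankings = []
--     for voter_idx in range(n_voters):
--         ranking = [preferences[rank][voter_idx] for rank in range(n_ranks)]
--         voter_rankings.append(ranking)
--
--     # Insert "100" at specified position for each voter
--     for voter_idx, pos in enumerate(insertion_positions):
--         if pos is not None and voter_idx < len(voter_rankings):
--             # Clamp position to valid range
--             pos = max(0, min(pos, len(voter_rankings[voter_idx])))
--             voter_rankings[voter_idx].insert(pos, "100")
--         elif voter_idx < len(voter_rankings):
--             # None position - insert at bottom
--             voter_rankings[voter_idx].append("100")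
--
--     # Convert back to [rank][voter] format
--     n_new_ranks = 101
--     new_preferences = []
--     for rank in range(n_new_ranks):
--         rank_row = []
--         for voter_idx in range(n_voters):
--             if rank < len(voter_rankings[voter_idx]):
--                 rank_row.append(voter_rankings[voter_idx][rank])
--             else:
--                 rank_row.append("100")
--         new_preferences.append(rank_row)
--
--     return new_preferences
-- ===== SOURCE B (Python) =====
-- def construct_101_preferences(preferences, insertion_positions):
--     n_ranks = len(preferences)
--     n_voters = len(preferences[0]) if preferences else 0
--
--     # Effective insertion position per voter: clamp(pos, 0, n_ranks) when given,
--     # n_ranks (bottom) when missing or None.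
--     ps = []
--     for v in range(n_voters):
--         if v < len(insertion_positions) and insertion_positions[v] is not None:
--             ps.append(max(0, min(insertion_positions[v], n_ranks)))
--         else:
--             ps.append(n_ranks)
--
--     # Fill the 101-rank grid directly with offset arithmetic (no transposes, no insert).
--     out = []
--     for rank in range(101):
--         row = []
--         for v in range(n_voters):
--             p = ps[v]
--             if rank == p:
--                 row.append("100")
--             elif rank < p:
--                 row.append(preferences[rank][v])
--             elif rank - 1 < n_ranks:
--                 row.append(preferences[rank - 1][v])
--             else:
--                 row.append("100")
--         out.append(row)
--     return out
-- ===== Notes on version B (the rewrite author's own statement) =====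
-- stated objective: alternative
-- what changed: B drops A's voter-centric intermediate (column extraction, list.insert, transpose back) and fills the 101-rank grid in one pass, computing each cell from the voter's clamped insertion position with offset arithmetic.
import Mathlib
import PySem

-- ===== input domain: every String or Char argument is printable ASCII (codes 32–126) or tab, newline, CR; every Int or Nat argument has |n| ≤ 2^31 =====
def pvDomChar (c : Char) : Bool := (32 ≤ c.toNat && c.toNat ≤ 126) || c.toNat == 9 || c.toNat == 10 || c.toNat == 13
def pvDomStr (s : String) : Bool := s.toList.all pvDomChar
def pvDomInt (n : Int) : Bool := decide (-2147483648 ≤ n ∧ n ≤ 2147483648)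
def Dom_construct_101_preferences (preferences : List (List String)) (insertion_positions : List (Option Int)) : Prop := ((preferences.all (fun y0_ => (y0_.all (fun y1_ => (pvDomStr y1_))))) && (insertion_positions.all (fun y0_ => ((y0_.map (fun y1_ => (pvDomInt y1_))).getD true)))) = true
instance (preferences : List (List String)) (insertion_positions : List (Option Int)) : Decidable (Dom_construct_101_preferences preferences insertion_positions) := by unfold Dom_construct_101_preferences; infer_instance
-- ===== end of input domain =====

-- B fills the 101×n_voters grid in one pass from per-voter insertion positions (offset
-- arithmetic) instead of A's column extraction + list.insert + transpose back (objective: alternative).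

-- ===== PORT A =====
-- the body of A's insertion loop for one voter: insert "100" at the clamped position, or append for None
def pvAIns (l : List String) (pos : Option Int) : List String :=
  match pos with
  | some p =>
    -- pos = max(0, min(pos, len(l))); l.insert(pos, "100")  (index is clamped into [0, len l], so take/drop is exact)
    let pc := (max 0 (min p (l.length : Int))).toNat
    l.take pc ++ "100" :: l.drop pc
  | none => l ++ ["100"]

def construct_101_preferences (preferences : List (List String)) (insertion_positions : List (Option Int)) : List (List String) :=
  let n_voters : Nat := (preferences.headD []).length
  -- voter-centric format; Python's preferences[rank][voter_idx] is in range under Pre_, so getD is exact there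
  let voter_rankings := (List.range n_voters).map (fun v => preferences.map (fun row => row.getD v ""))
  -- for voter_idx, pos in enumerate(insertion_positions): …  (enumerate indices are ≥ 0, so Nat zipIdx is exact)
  let vr := (insertion_positions.zipIdx).foldl
    (fun vr x => if x.2 < vr.length then vr.set x.2 (pvAIns (vr.getD x.2 []) x.1) else vr)
    voter_rankings
  -- convert back to [rank][voter] format, padding with "100"
  (List.range 101).map (fun rank =>
    (List.range n_voters).map (fun v =>
      let l := vr.getD v []
      if rank < l.length then l.getD rank "" else "100"))

-- ===== PORT B =====
def construct_101_preferences_alt (preferences : List (List String)) (insertion_positions : List (Option Int)) : List (List String) :=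
  let n_ranks : Nat := preferences.length
  let n_voters : Nat := (preferences.headD []).length
  -- effective insertion position per voter (missing entry and None both mean bottom = n_ranks)
  -- missing entry and None both fall to the bottom position n_ranks
  let ps : List Nat := (List.range n_voters).map (fun v =>
    (insertion_positions.getD v none).elim n_ranks (fun p => (max 0 (min p (n_ranks : Int))).toNat))
  (List.range 101).map (fun rank =>
    (List.range n_voters).map (fun v =>
      let p := ps.getD v 0
      if rank = p then "100"
      else if rank < p then (preferences.getD rank []).getD v ""
      else if rank - 1 < n_ranks then (preferences.getD (rank - 1) []).getD v ""
      else "100"))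

-- ===== PRECONDITION & SPEC =====
-- Pre_ excludes ragged matrices where some row is shorter than the first row: there Python A
-- raises IndexError on preferences[rank][voter_idx].
def Pre_construct_101_preferences (preferences : List (List String)) (insertion_positions : List (Option Int)) : Prop :=
  ∀ row ∈ preferences, (preferences.headD []).length ≤ row.length
instance (preferences : List (List String)) (insertion_positions : List (Option Int)) : Decidable (Pre_construct_101_preferences preferences insertion_positions) := by unfold Pre_construct_101_preferences; infer_instance

def pvWitness_construct_101_preferences : List (List String) × List (Option Int) :=
  ([["0", "1"], ["2", "3"]], [some 1, none])

def Spec_construct_101_preferences (preferences : List (List String)) (insertion_positions : List (Option Int)) (out : List (List String)) : Prop := out = construct_101_preferences_alt preferences insertion_positions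
instance (preferences : List (List String)) (insertion_positions : List (Option Int)) (out : List (List String)) : Decidable (Spec_construct_101_preferences preferences insertion_positions out) := by unfold Spec_construct_101_preferences; infer_instance

-- ===== CLAIM (what is proved, stated in full; the proofs are below) =====
def Claim_equal_construct_101_preferences : Prop := ∀ (preferences : List (List String)) (insertion_positions : List (Option Int)), Dom_construct_101_preferences preferences insertion_positions → Pre_construct_101_preferences preferences insertion_positions → Spec_construct_101_preferences preferences insertion_positions (construct_101_preferences preferences insertion_positions)

-- ===== LEMMAS AND PROOFS =====

-- the step of A's insertion loop
def pvAStep (vr : List (List String)) (x : Option Int × Nat) : List (List String) :=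
  if x.2 < vr.length then vr.set x.2 (pvAIns (vr.getD x.2 []) x.1) else vr

theorem pvAStep_eq (vr : List (List String)) (x : Option Int × Nat) :
    (if x.2 < vr.length then vr.set x.2 (pvAIns (vr.getD x.2 []) x.1) else vr) = pvAStep vr x := rfl

theorem pvALoop_getD (ips : List (Option Int)) (k v : Nat) (vr : List (List String)) :
    ((ips.zipIdx k).foldl pvAStep vr).getD v [] =
      if v < vr.length ∧ k ≤ v ∧ v - k < ips.length then
        pvAIns (vr.getD v []) (ips.getD (v - k) none)
      else vr.getD v [] := by
  induction ips generalizing k vr with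
  | nil =>
    simp only [List.zipIdx_nil, List.foldl_nil, List.length_nil]
    rw [if_neg]; omega
  | cons ip rest ih =>
    simp only [List.zipIdx_cons, List.foldl_cons, List.length_cons]
    rw [ih]
    have hlen : (pvAStep vr (ip, k)).length = vr.length := by
      unfold pvAStep; split <;> simp
    by_cases hv : v = k
    · subst hv
      rw [if_neg (by omega)]
      unfold pvAStep
      by_cases hk : v < vr.length
      · rw [if_pos hk, if_pos ⟨hk, le_refl v, by omega⟩]
        simp [List.getD_eq_getElem?_getD, hk]
      · rw [if_neg hk, if_neg (fun h => hk h.1)]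
    · have hstep : (pvAStep vr (ip, k)).getD v [] = vr.getD v [] := by
        unfold pvAStep
        split
        · simp [List.getD_eq_getElem?_getD, List.getElem?_set_ne (Ne.symm hv)]
        · rfl
      rw [hstep, hlen]
      by_cases hc : v < vr.length ∧ k + 1 ≤ v ∧ v - (k + 1) < rest.length
      · rw [if_pos hc, if_pos ⟨hc.1, by omega, by omega⟩]
        obtain ⟨m, hm⟩ : ∃ m, v - k = m + 1 := ⟨v - (k + 1), by omega⟩
        rw [hm]
        have : v - (k + 1) = m := by omega
        simp [this]
      · rw [if_neg hc, if_neg (fun h => hc ⟨h.1, by omega, by omega⟩)]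

-- equation lemmas for pvAIns
theorem pvAIns_none (l : List String) : pvAIns l none = l ++ ["100"] := rfl
theorem pvAIns_some (l : List String) (p : Int) :
    pvAIns l (some p) = l.take (max 0 (min p (l.length : Int))).toNat ++ "100" :: l.drop (max 0 (min p (l.length : Int))).toNat := rfl

-- getD of a (List.range n).map
theorem pvRangeMapGetD {α : Type} (n v : Nat) (f : Nat → α) (d : α) (hv : v < n) :
    ((List.range n).map f).getD v d = f v := by
  simp [List.getD_eq_getElem?_getD, hv]

-- the value of one cell after inserting "100" at position p ≤ len c, as B computes it
theorem pvCell_insert (c : List String) (p r : Nat) (hp : p ≤ c.length) :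
    (if r < (c.take p ++ "100" :: c.drop p).length then (c.take p ++ "100" :: c.drop p).getD r "" else "100")
      = (if r = p then "100"
         else if r < p then c.getD r ""
         else if r - 1 < c.length then c.getD (r - 1) ""
         else "100") := by
  have htake : (c.take p).length = p := by rw [List.length_take]; omega
  have hlen : (c.take p ++ "100" :: c.drop p).length = c.length + 1 := by
    rw [List.length_append, htake, List.length_cons, List.length_drop]; omega
  rw [hlen]
  simp only [List.getD_eq_getElem?_getD]
  rcases lt_trichotomy r p with h | h | h
  · rw [if_pos (show r < c.length + 1 by omega), if_neg (show ¬ r = p by omega), if_pos h]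
    rw [List.getElem?_append_left (by omega), List.getElem?_take_of_lt h]
  · subst h
    rw [if_pos (show r < c.length + 1 by omega), if_pos rfl]
    rw [List.getElem?_append_right (by omega), htake]
    simp
  · rw [if_neg (show ¬ r = p by omega), if_neg (show ¬ r < p by omega)]
    by_cases hr : r < c.length + 1
    · rw [if_pos hr, if_pos (show r - 1 < c.length by omega)]
      rw [List.getElem?_append_right (by omega), htake]
      have h1 : r - p = (r - p - 1) + 1 := by omega
      rw [h1]
      simp only [List.getElem?_cons_succ, List.getElem?_drop]
      have h2 : p + (r - p - 1) = r - 1 := by omega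
      rw [h2]
    · rw [if_neg hr, if_neg (show ¬ r - 1 < c.length by omega)]

-- the unchanged column (voter beyond insertion_positions), as B computes it with p = len c
theorem pvCell_noinsert (c : List String) (r : Nat) :
    (if r < c.length then c.getD r "" else "100")
      = (if r = c.length then "100"
         else if r < c.length then c.getD r ""
         else if r - 1 < c.length then c.getD (r - 1) ""
         else "100") := by
  split_ifs <;> first | rfl | omega

-- c ++ ["100"] is insertion at position len c
theorem pvAppend_eq_insert (c : List String) :
    c ++ ["100"] = c.take c.length ++ "100" :: c.drop c.length := by
  simp

-- the column of voter v, and its getD for ranks in range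
theorem pvCol_getD (preferences : List (List String)) (v r : Nat) (hr : r < preferences.length) :
    (preferences.map (fun row => row.getD v "")).getD r "" = (preferences.getD r []).getD v "" := by
  simp only [List.getD_eq_getElem?_getD, List.getElem?_map]
  rcases h : preferences[r]? with _ | row
  · simp at h; omega
  · simp

-- ===== VERDICT (by name: the statement is the Claim_ definition above) =====
theorem construct_101_preferences_spec : Claim_equal_construct_101_preferences := by
  intro preferences insertion_positions _ _
  unfold Spec_construct_101_preferences construct_101_preferences construct_101_preferences_alt
  simp only [pvAStep_eq]
  apply List.map_congr_left
  intro rank _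
  apply List.map_congr_left
  intro v hv
  rw [List.mem_range] at hv
  set n_voters : Nat := (preferences.headD []).length with hnv
  set c : List String := preferences.map (fun row => row.getD v "") with hc
  have hclen : c.length = preferences.length := by simp [hc]
  have hvr : ((List.range n_voters).map (fun v => preferences.map (fun row => row.getD v ""))).getD v [] = c :=
    pvRangeMapGetD n_voters v _ [] hv
  have hvrlen : ((List.range n_voters).map (fun v => preferences.map (fun row => row.getD v ""))).length = n_voters := by simp
  rw [pvALoop_getD, hvrlen, hvr]
  rw [pvRangeMapGetD n_voters v _ 0 hv]
  by_cases hin : v < insertion_positions.length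
  · rw [if_pos (show v < n_voters ∧ 0 ≤ v ∧ v - 0 < insertion_positions.length from ⟨hv, Nat.zero_le v, by omega⟩)]
    simp only [Nat.sub_zero]
    have hget : insertion_positions.getD v none = insertion_positions[v]'hin := by
      simp [List.getD_eq_getElem?_getD, List.getElem?_eq_getElem hin]
    rcases hpos : insertion_positions[v]'hin with _ | p
    · -- None entry: append at the bottom = insert at position len c
      rw [hget, hpos]
      simp only [Option.elim_none, pvAIns_none]
      rw [pvAppend_eq_insert, pvCell_insert c c.length rank (le_refl _), hclen]
      split_ifs <;> first | rfl | omega | (exact pvCol_getD preferences v _ (by omega))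
    · rw [hget, hpos]
      simp only [Option.elim_some, pvAIns_some]
      have hple : (max 0 (min p (c.length : Int))).toNat ≤ c.length := by omega
      rw [pvCell_insert c _ rank hple, hclen]
      have hP : (max 0 (min p ((preferences.length : Nat) : Int))).toNat ≤ preferences.length := by omega
      split_ifs <;> first | rfl | omega | (exact pvCol_getD preferences v _ (by omega))
  · rw [if_neg (show ¬ (v < n_voters ∧ 0 ≤ v ∧ v - 0 < insertion_positions.length) from fun h => hin (by omega)), pvCell_noinsert c rank]
    have hnone : insertion_positions.getD v none = none := by
      simp [List.getD_eq_getElem?_getD, List.getElem?_eq_none (show insertion_positions.length ≤ v by omega)]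
    rw [hnone, hclen]
    simp only [Option.elim_none]
    split_ifs <;> first | rfl | omega | (exact pvCol_getD preferences v _ (by omega))
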